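-- pv_equiv track=rewrite | github.com/Majbor1/Nowy-folder | 10.py | f
-- ===== SOURCE A (Python) =====
-- def f(arr):
--     s_s = []
--     for i in arr:
--         for j in i:
--             s_s.append(j)
--
--     smallest = min(s_s)
--
--     for i in range(len(arr)):
--         for j in range(len(arr[i])):
--             if arr[i][j] == smallest:
--                 if i == j:
--                     return True
--                 else:
--                     return False
-- ===== SOURCE B (Python) =====
-- def f(arr):
--     # One fused pass: track the minimum and its first row-major position.
--     best = None
--     bi = bj = -1
--     for i, row in enumerate(arr):
--         for j, x in enumerate(row):
--             if best is None or x < best: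
--                 best, bi, bj = x, i, j
--     if best is None:
--         raise ValueError("min() arg is an empty sequence")
--     return bi == bj
-- ===== Notes on version B (the rewrite author's own statement) =====
-- stated objective: simpler
-- what changed: Replaces A's three traversals (flatten into a list, min over it, nested index rescan for the first occurrence) by one fused pass over enumerate that maintains the minimum and its first row-major position, returning bi == bj at the end.
import Mathlib
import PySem

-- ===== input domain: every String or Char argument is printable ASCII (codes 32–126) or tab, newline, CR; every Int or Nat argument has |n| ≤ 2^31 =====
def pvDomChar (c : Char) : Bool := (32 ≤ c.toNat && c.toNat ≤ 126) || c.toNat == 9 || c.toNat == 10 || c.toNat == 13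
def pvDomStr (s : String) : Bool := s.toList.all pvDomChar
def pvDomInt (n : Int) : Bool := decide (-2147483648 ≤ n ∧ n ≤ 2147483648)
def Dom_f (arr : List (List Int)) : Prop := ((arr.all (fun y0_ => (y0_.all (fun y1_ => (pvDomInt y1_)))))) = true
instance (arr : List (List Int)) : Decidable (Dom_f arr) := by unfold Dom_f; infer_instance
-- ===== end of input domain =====

-- B replaces A's flatten+min+rescan by one fused pass keeping the minimum and its first row-major position (simpler, one traversal).


-- ===== PORT A =====
-- inner loop of the rescan: j runs over row; returns some (i == j) at the first element equal to sm
def aScanRow (i : Nat) (j : Nat) (row : List Int) (sm : Int) : Option Bool :=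
  match row with
  | [] => none
  | x :: t => if x == sm then some (i == j) else aScanRow i (j + 1) t sm

-- outer loop of the rescan over rows, carrying the row index i
def aScan (i : Nat) (rows : List (List Int)) (sm : Int) : Bool :=
  match rows with
  | [] => false          -- Python falls off the loops (unreachable: sm is an element)
  | r :: rs =>
    match aScanRow i 0 r sm with
    | some b => b
    | none => aScan (i + 1) rs sm

def f (arr : List (List Int)) : Bool :=
  let s_s := arr.foldl (fun acc i => i.foldl (fun a j => a ++ [j]) acc) []
  match PySem.List.min? s_s (fun x => x) with
  | none => false        -- min([]) raises ValueError; excluded by Pre_f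
  | some smallest => aScan 0 arr smallest

-- ===== PORT B =====
-- running state: none = "best is None", some (best, bi, bj)
def bStep (st : Option (Int × Nat × Nat)) (p : Int × Nat × Nat) : Option (Int × Nat × Nat) :=
  match st with
  | none => some p
  | some q => if p.1 < q.1 then some p else some q

def f_alt (arr : List (List Int)) : Bool :=
  let st := arr.zipIdx.foldl
    (fun st ri => ri.1.zipIdx.foldl (fun st xj => bStep st (xj.1, ri.2, xj.2)) st) none
  match st with
  | none => false        -- "raise ValueError"; excluded by Pre_f
  | some q => q.2.1 == q.2.2

-- ===== PRECONDITION & SPEC =====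
-- Pre_f excludes exactly the inputs with no elements at all, on which both Pythons raise ValueError.
def Pre_f (arr : List (List Int)) : Prop := arr.flatten ≠ []
instance (arr : List (List Int)) : Decidable (Pre_f arr) := by unfold Pre_f; infer_instance
def pvWitness_f : List (List Int) := [[3, 1], [2, 0]]
def Spec_f (arr : List (List Int)) (out : Bool) : Prop := out = f_alt arr
instance (arr : List (List Int)) (out : Bool) : Decidable (Spec_f arr out) := by unfold Spec_f; infer_instance

-- ===== CLAIM (what is proved, stated in full; the proofs are below) =====
def Claim_equal_f : Prop := ∀ (arr : List (List Int)), Dom_f arr → Pre_f arr → Spec_f arr (f arr)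

-- ===== LEMMAS AND PROOFS =====

-- row-major list of (value, row index, column index), rows starting at index n
def tri (rows : List (List Int)) (n : Nat) : List (Int × Nat × Nat) :=
  (rows.zipIdx n).flatMap (fun ri => ri.1.zipIdx.map (fun xj => (xj.1, ri.2, xj.2)))

-- first element achieving the minimum value (strict "<" keeps the earlier one)
def fm : List (Int × Nat × Nat) → Option (Int × Nat × Nat)
  | [] => none
  | p :: ps =>
    match fm ps with
    | none => some p
    | some r => some (if r.1 < p.1 then r else p)

theorem fm_cons (p : Int × Nat × Nat) (ps : List (Int × Nat × Nat)) :
    fm (p :: ps) = match fm ps with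
      | none => some p
      | some r => some (if r.1 < p.1 then r else p) := rfl

theorem tri_cons (r : List Int) (rs : List (List Int)) (n : Nat) :
    tri (r :: rs) n = r.zipIdx.map (fun xj => (xj.1, n, xj.2)) ++ tri rs (n + 1) := by
  simp [tri]

theorem foldl_snoc (l : List Int) (acc : List Int) :
    l.foldl (fun a j => a ++ [j]) acc = acc ++ l := by
  induction l generalizing acc with
  | nil => simp
  | cons x t ih => simp [List.foldl_cons, ih]

theorem flatten_foldl (arr : List (List Int)) (acc : List Int) :
    arr.foldl (fun acc i => i.foldl (fun a j => a ++ [j]) acc) acc = acc ++ arr.flatten := by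
  induction arr generalizing acc with
  | nil => simp
  | cons r rs ih => rw [List.foldl_cons, foldl_snoc, ih]; simp

theorem row_values (row : List Int) (i : Nat) (j : Nat) :
    List.map ((fun p : Int × Nat × Nat => p.1) ∘ fun xj : Int × Nat => (xj.1, i, xj.2))
      (row.zipIdx j) = row := by
  induction row generalizing j with
  | nil => simp
  | cons x t ih => simp [List.zipIdx_cons, Function.comp, ih]

theorem tri_values (rows : List (List Int)) (n : Nat) :
    (tri rows n).map (fun p => p.1) = rows.flatten := by
  induction rows generalizing n with
  | nil => simp [tri]
  | cons r rs ih => simp [tri_cons, ih, List.map_map, row_values]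

-- B's nested fold equals a single fold of bStep over the triples
theorem b_fold_eq (rows : List (List Int)) (n : Nat) (st : Option (Int × Nat × Nat)) :
    (rows.zipIdx n).foldl
      (fun st ri => ri.1.zipIdx.foldl (fun st xj => bStep st (xj.1, ri.2, xj.2)) st) st
    = (tri rows n).foldl bStep st := by
  induction rows generalizing n st with
  | nil => simp [tri]
  | cons r rs ih =>
    simp only [List.zipIdx_cons, List.foldl_cons, tri_cons, List.foldl_append]
    rw [ih]
    congr 1
    rw [List.foldl_map]

-- fold of bStep from a some-state
theorem foldl_bStep_some (l : List (Int × Nat × Nat)) (q : Int × Nat × Nat) :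
    l.foldl bStep (some q)
      = some (match fm l with | none => q | some r => if r.1 < q.1 then r else q) := by
  induction l generalizing q with
  | nil => simp [fm]
  | cons p ps ih =>
    simp only [List.foldl_cons, bStep, fm_cons]
    rcases h : decide (p.1 < q.1) with _ | _
    · simp at h
      rw [if_neg (by omega), ih]
      rcases hfm : fm ps with _ | r
      · simp [if_neg (show ¬ p.1 < q.1 by omega)]
      · simp only []
        split_ifs <;> simp_all <;> omega
    · simp at h
      rw [if_pos h, ih]
      rcases hfm : fm ps with _ | r
      · simp [if_pos h]
      · simp only []
        split_ifs <;> simp_all <;> omega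

theorem foldl_bStep_none (l : List (Int × Nat × Nat)) :
    l.foldl bStep none = fm l := by
  cases l with
  | nil => simp [fm]
  | cons p ps =>
    simp only [List.foldl_cons, bStep, foldl_bStep_some, fm_cons]
    rcases h : fm ps with _ | r <;> simp

theorem foldl_min_min (v : List Int) (a b : Int) :
    v.foldl min (min a b) = min a (v.foldl min b) := by
  induction v generalizing b with
  | nil => simp
  | cons c cs ih =>
    simp only [List.foldl_cons]
    rw [show min (min a b) c = min a (min b c) by omega]
    exact ih (min b c)

-- fm's value is the running minimum of the values
theorem fm_val (l : List (Int × Nat × Nat)) (p r : Int × Nat × Nat)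
    (h : fm (p :: l) = some r) : r.1 = (l.map (fun q => q.1)).foldl min p.1 := by
  induction l generalizing p r with
  | nil => simp [fm] at h; simp [← h]
  | cons a t ih =>
    rw [fm_cons] at h
    rcases hfm : fm (a :: t) with _ | s
    · simp [fm_cons] at hfm
      rcases h2 : fm t with _ | u <;> rw [h2] at hfm <;> simp at hfm
    · rw [hfm] at h
      have hs := ih a s hfm
      simp only [List.map_cons, List.foldl_cons]
      rw [foldl_min_min, ← hs]
      have h2 : some (if s.1 < p.1 then s else p) = some r := h
      split_ifs at h2 <;> simp_all <;> omega

-- fm is the first element whose value equals the minimum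
theorem fm_find (l : List (Int × Nat × Nat)) (p : Int × Nat × Nat) :
    fm (p :: l) = (p :: l).find? (fun q => q.1 == (l.map (fun q => q.1)).foldl min p.1) := by
  induction l generalizing p with
  | nil => simp [fm, List.find?]
  | cons a t ih =>
    rcases hfm : fm (a :: t) with _ | s
    · simp [fm_cons] at hfm
      rcases h2 : fm t with _ | u <;> rw [h2] at hfm <;> simp at hfm
    · have hs := fm_val t a s hfm
      have hih := ih a
      rw [hfm] at hih
      have h1 : fm (p :: a :: t) = some (if s.1 < p.1 then s else p) := by
        rw [fm_cons, hfm]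
      have hmin : ((a :: t).map (fun q => q.1)).foldl min p.1
          = min p.1 ((t.map (fun q => q.1)).foldl min a.1) := by
        simp only [List.map_cons, List.foldl_cons]
        exact foldl_min_min _ p.1 a.1
      by_cases hlt : s.1 < p.1
      · have hm : ((a :: t).map (fun q => q.1)).foldl min p.1
            = (t.map (fun q => q.1)).foldl min a.1 := by rw [hmin]; omega
        rw [h1, if_pos hlt, hm, List.find?_cons_of_neg (by simp; omega)]
        exact hih
      · have hm : ((a :: t).map (fun q => q.1)).foldl min p.1 = p.1 := by rw [hmin]; omega
        rw [h1, if_neg hlt, hm, List.find?_cons_of_pos (by simp)]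

-- A's rescan equals find? over the triples
theorem aScanRow_find (row : List Int) (i j : Nat) (sm : Int) :
    aScanRow i j row sm
      = (((row.zipIdx j).map (fun xj => (xj.1, i, xj.2))).find?
          (fun p => p.1 == sm)).map (fun p => (p.2.1 == p.2.2 : Bool)) := by
  induction row generalizing j with
  | nil => simp [aScanRow]
  | cons x t ih =>
    simp only [aScanRow, List.zipIdx_cons, List.map_cons]
    by_cases h : x = sm
    · rw [if_pos (by simp [h]), List.find?_cons_of_pos (by simp [h])]
      rfl
    · rw [if_neg (by simp [h]), List.find?_cons_of_neg (by simp [h]), ih]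

theorem aScan_find (rows : List (List Int)) (n : Nat) (sm : Int) :
    aScan n rows sm
      = match (tri rows n).find? (fun p => p.1 == sm) with
        | none => false
        | some p => p.2.1 == p.2.2 := by
  induction rows generalizing n with
  | nil => simp [aScan, tri]
  | cons r rs ih =>
    simp only [aScan, tri_cons, List.find?_append, aScanRow_find, ih]
    rcases h : (r.zipIdx.map (fun xj => (xj.1, n, xj.2))).find? (fun p => p.1 == sm)
      with _ | p <;> simp [h]

-- ===== VERDICT (by name: the statement is the Claim_ definition above) =====
theorem f_spec : Claim_equal_f := by
  intro arr _ hpre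
  unfold Spec_f f f_alt
  rw [b_fold_eq, foldl_bStep_none, flatten_foldl]
  simp only [List.nil_append]
  have hval := tri_values arr 0
  rcases htri : tri arr 0 with _ | ⟨p, l⟩
  · exfalso; apply hpre; rw [← hval, htri]; rfl
  · rw [htri] at hval
    rw [← hval]
    simp only [List.map_cons]
    rw [PySem.List.min?_id_cons]
    have hred : (match some ((l.map (fun q => q.1)).foldl min p.1) with
        | none => false
        | some smallest => aScan 0 arr smallest)
        = aScan 0 arr ((l.map (fun q => q.1)).foldl min p.1) := rfl
    rw [hred, aScan_find, htri, ← fm_find]
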